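-- pv_equiv track=rewrite | github.com/CTStudyGroup/BOJ | _youn/boj_20437.py | solve
-- ===== SOURCE A (Python) =====
-- from collections import defaultdict
--
-- def solve(W, K):
--     index = defaultdict(list)
--     for i, w in enumerate(W):
--         index[w].append(i)
--
--     ans = [float('inf'), -1]
--     for k in index.keys():
--         if len(index[k])<K: continue
--         for i in range(len(index[k])-K+1):
--             length = index[k][i+K-1]-index[k][i]+1
--             ans[0] = min(ans[0], length)
--             ans[1] = max(ans[1], length)
--     return ans if ans[1]!=-1 else [-1]
-- ===== SOURCE B (Python) =====
-- from collections import deque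
--
-- def solve(W, K):
--     # One left-to-right pass: per character keep a sliding window (deque) of its
--     # last at-most-K-1 positions; when a window reaches K, record the span length.
--     pos = {}
--     best = None
--     for i, w in enumerate(W):
--         q = pos.setdefault(w, deque())
--         q.append(i)
--         if len(q) == K:
--             length = i - q[0] + 1
--             best = (length, length) if best is None else (min(best[0], length), max(best[1], length))
--             q.popleft()
--     return [-1] if best is None else [best[0], best[1]]
-- ===== Notes on version B (the rewrite author's own statement) =====
-- stated objective: alternative
-- what changed: A first builds a full char->positions index and then, per character, scans every K-window of its position list in a second nested phase; B is a single left-to-right pass keeping per character a deque of its last at-most-K-1 positions and recording a span length whenever a deque reaches K.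
import Mathlib
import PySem

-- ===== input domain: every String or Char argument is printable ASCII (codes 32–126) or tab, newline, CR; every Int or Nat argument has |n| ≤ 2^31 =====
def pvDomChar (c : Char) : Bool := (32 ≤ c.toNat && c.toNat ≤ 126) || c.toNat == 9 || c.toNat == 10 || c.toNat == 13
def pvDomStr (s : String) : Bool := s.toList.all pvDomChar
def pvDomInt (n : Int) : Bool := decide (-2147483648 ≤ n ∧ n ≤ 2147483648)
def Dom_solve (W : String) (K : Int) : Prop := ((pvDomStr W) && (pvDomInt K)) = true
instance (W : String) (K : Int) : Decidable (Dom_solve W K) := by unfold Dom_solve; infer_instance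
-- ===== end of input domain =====

-- B replaces A's two-phase "index all positions, then scan every K-window per character"
-- with a single left-to-right pass keeping, per character, a sliding window of its last
-- at most K-1 positions (objective: alternative single-pass structure, same return value).

-- ===== PORT A =====
-- Python's `ans[0] = float('inf')` is modelled as `none` (min of `none` and x is x);
-- whenever ans[1] ≠ -1, ans[0] is `some`, so the returned list is all-Int (`.getD 0` is never the default there).
def solve (W : String) (K : Int) : List Int :=
  let index : PySem.Dict Char (List Int) :=
    (PySem.List.enumerate W.toList 0).foldl
      (fun d p => d.modify p.2 [] (fun l => l ++ [p.1])) PySem.Dict.empty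
  let ans : Option Int × Int :=
    index.keys.foldl
      (fun ans k =>
        let ps := index.getD k []
        if ((ps.length : Int) < K) then ans
        else
          (PySem.List.pyRange 0 ((ps.length : Int) - K + 1) 1).foldl
            (fun ans i =>
              let len := PySem.List.pyGetD ps (i + K - 1) 0 - PySem.List.pyGetD ps i 0 + 1
              (some (match ans.1 with | none => len | some m => min m len), max ans.2 len))
            ans)
      (none, -1)
  if ans.2 ≠ -1 then [ans.1.getD 0, ans.2] else [-1]

-- ===== PORT B =====
-- q = pos.setdefault(w, deque()); q.append(i) is modelled by reading the stored window
-- (default []) and appending; q.popleft() is q.tail (the deque holds the same Ints).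
def solve_alt (W : String) (K : Int) : List Int :=
  let r : PySem.Dict Char (List Int) × Option (Int × Int) :=
    (PySem.List.enumerate W.toList 0).foldl
      (fun s p =>
        let q := s.1.getD p.2 [] ++ [p.1]
        if ((q.length : Int) = K) then
          let len := p.1 - PySem.List.pyGetD q 0 0 + 1
          let best :=
            match s.2 with
            | none => (len, len)
            | some b => (min b.1 len, max b.2 len)
          (s.1.insert p.2 q.tail, some best)
        else (s.1.insert p.2 q, s.2))
      (PySem.Dict.empty, none)
  match r.2 with
  | none => [-1]
  | some b => [b.1, b.2]

-- ===== PRECONDITION & SPEC =====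
-- Pre_ excludes K ≤ 0 with nonempty W, where A raises IndexError (out-of-range occurrence indexing).
def Pre_solve (W : String) (K : Int) : Prop := 1 ≤ K ∨ W = ""
instance (W : String) (K : Int) : Decidable (Pre_solve W K) := by unfold Pre_solve; infer_instance

def pvWitness_solve : String × Int := ("aabcaab", 2)

def Spec_solve (W : String) (K : Int) (out : List Int) : Prop := out = solve_alt W K
instance (W : String) (K : Int) (out : List Int) : Decidable (Spec_solve W K out) := by unfold Spec_solve; infer_instance

-- ===== CLAIM (what is proved, stated in full; the proofs are below) =====
def Claim_equal_solve : Prop := ∀ (W : String) (K : Int), Dom_solve W K → Pre_solve W K → Spec_solve W K (solve W K)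

-- ===== LEMMAS AND PROOFS =====

-- positions (as Int) at which character c occurs, read off an enumerate-style pair list
def occE (l : List (Int × Char)) (c : Char) : List Int :=
  (l.filter (fun p => p.2 == c)).map (fun p => p.1)

-- the K-occurrence window lengths of one character's position list
def wins (k : Nat) (ps : List Int) : List Int :=
  (List.range (ps.length + 1 - k)).map (fun i => ps.getD (i + k - 1) 0 - ps.getD i 0 + 1)

-- all window lengths, grouped by character in first-occurrence order (A's traversal order)
def allWins (k : Nat) (l : List (Int × Char)) : List Int :=
  (PySem.Set.ofList (l.map (fun p => p.2))).flatMap (fun c => wins k (occE l c))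

-- B's running (min, max) step
def obest (a : Option (Int × Int)) (x : Int) : Option (Int × Int) :=
  match a with
  | none => some (x, x)
  | some b => some (min b.1 x, max b.2 x)

-- A's running (min?, max) step
def astep (a : Option Int × Int) (x : Int) : Option Int × Int :=
  (some (match a.1 with | none => x | some m => min m x), max a.2 x)

-- correspondence between B's state and A's state
def phi (a : Option (Int × Int)) : Option Int × Int :=
  match a with
  | none => (none, -1)
  | some b => (some b.1, b.2)

-- the tail window B keeps per character: the last (at most k-1) positions
def wtail (k : Nat) (ps : List Int) : List Int := ps.drop (ps.length + 1 - k)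

-- B's loop body, named so the invariant below can speak about it (defeq to the lambda in solve_alt)
def bstep (K : Int) (s : PySem.Dict Char (List Int) × Option (Int × Int)) (p : Int × Char) :
    PySem.Dict Char (List Int) × Option (Int × Int) :=
  let q := s.1.getD p.2 [] ++ [p.1]
  if ((q.length : Int) = K) then
    let len := p.1 - PySem.List.pyGetD q 0 0 + 1
    let best :=
      match s.2 with
      | none => (len, len)
      | some b => (min b.1 len, max b.2 len)
    (s.1.insert p.2 q.tail, some best)
  else (s.1.insert p.2 q, s.2)

lemma rc_obest : RightCommutative obest := by
  constructor
  intro b a1 a2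
  rcases b with _ | ⟨m, M⟩ <;> simp [obest] <;> constructor <;> omega

lemma dict_getD (l : List (Int × Char)) (c : Char) :
    ((l.foldl (fun d p => d.modify p.2 [] (fun t => t ++ [p.1])) PySem.Dict.empty).getD c []) = occE l c := by
  have h : l.foldl (fun d p => d.modify p.2 [] (fun t => t ++ [p.1])) PySem.Dict.empty
      = (l.map Prod.swap).foldl (fun d p => d.modify p.1 [] (fun t => t ++ [p.2])) PySem.Dict.empty := by
    rw [List.foldl_map]; rfl
  rw [h, PySem.Dict.getD_foldl_modify_append, PySem.Dict.getD_empty]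
  simp [occE, List.filter_map, Function.comp_def, List.map_map]

lemma dict_keys (l : List (Int × Char)) :
    (l.foldl (fun d p => d.modify p.2 [] (fun t => t ++ [p.1])) PySem.Dict.empty).keys
      = PySem.Set.ofList (l.map (fun p => p.2)) := by
  rw [PySem.Dict.keys_foldl_modify_key l (fun p => p.2) [] (fun d p t => t ++ [p.1]) PySem.Dict.empty,
    PySem.Dict.keys_empty, PySem.Set.update_nil_left]

lemma occE_append (l : List (Int × Char)) (p : Int × Char) (c' : Char) :
    occE (l ++ [p]) c' = occE l c' ++ (if p.2 = c' then [p.1] else []) := by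
  simp only [occE, List.filter_append, List.map_append]
  congr 1
  by_cases h : p.2 = c' <;> simp [h]

lemma occE_append_ne (l : List (Int × Char)) (i : Int) (c c' : Char) (h : c ≠ c') :
    occE (l ++ [(i, c)]) c' = occE l c' := by
  rw [occE_append]; simp [h]

lemma occE_not_mem (l : List (Int × Char)) (c : Char) (h : c ∉ l.map (fun p => p.2)) :
    occE l c = [] := by
  simp only [occE, List.map_eq_nil_iff, List.filter_eq_nil_iff]
  intro p hp hc
  exact h (List.mem_map.mpr ⟨p, hp, by simpa using hc⟩)

lemma occE_pairwise (xs : List Char) (s : Int) (c : Char) :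
    (occE (PySem.List.enumerate xs s) c).Pairwise (· < ·) := by
  have := PySem.List.pairwise_lt_enumerate xs s
  exact List.pairwise_map.mpr ((this.filter _).imp (fun h => h))

lemma getD_mono (ps : List Int) (h : ps.Pairwise (· < ·)) (i j : Nat) (hij : i ≤ j)
    (hj : j < ps.length) : ps.getD i 0 ≤ ps.getD j 0 := by
  have hi : i < ps.length := lt_of_le_of_lt hij hj
  rw [List.getD_eq_getElem?_getD, List.getD_eq_getElem?_getD,
    List.getElem?_eq_getElem hi, List.getElem?_eq_getElem hj]
  rcases Nat.lt_or_ge i j with hlt | hge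
  · exact le_of_lt (List.pairwise_iff_getElem.mp h i j hi hj hlt)
  · have : i = j := le_antisymm hij hge
    subst this; simp

lemma getD_drop_zero (ps : List Int) (n : Nat) : (ps.drop n).getD 0 0 = ps.getD n 0 := by
  rw [List.getD_eq_getElem?_getD, List.getD_eq_getElem?_getD, List.getElem?_drop]
  simp

lemma wins_pos (k : Nat) (hk : 1 ≤ k) (ps : List Int) (h : ps.Pairwise (· < ·)) :
    ∀ x ∈ wins k ps, 1 ≤ x := by
  intro x hx
  simp only [wins, List.mem_map, List.mem_range] at hx
  obtain ⟨i, hi, rfl⟩ := hx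
  have h1 : i ≤ i + k - 1 := by omega
  have h2 : i + k - 1 < ps.length := by omega
  have := getD_mono ps h i (i + k - 1) h1 h2
  omega

lemma allWins_pos (k : Nat) (hk : 1 ≤ k) (xs : List Char) (s : Int) :
    ∀ x ∈ allWins k (PySem.List.enumerate xs s), 1 ≤ x := by
  intro x hx
  simp only [allWins, List.mem_flatMap] at hx
  obtain ⟨c, _, hc⟩ := hx
  exact wins_pos k hk _ (occE_pairwise xs s c) x hc

lemma wins_append (k : Nat) (hk : 1 ≤ k) (ps : List Int) (x : Int) :
    wins k (ps ++ [x]) = wins k ps ++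
      (if k ≤ ps.length + 1 then [x - (ps ++ [x]).getD (ps.length + 1 - k) 0 + 1] else []) := by
  by_cases hc : k ≤ ps.length + 1
  · have hlen : (ps ++ [x]).length + 1 - k = (ps.length + 1 - k) + 1 := by
      simp only [List.length_append, List.length_cons, List.length_nil]; omega
    simp only [wins, hlen, List.range_succ, List.map_append, List.map_cons, List.map_nil, if_pos hc]
    congr 1
    · apply List.map_congr_left
      intro i hi
      rw [List.mem_range] at hi
      rw [List.getD_append _ _ _ _ (by omega), List.getD_append _ _ _ _ (by omega)]
    · have hgl : (ps ++ [x]).getD (ps.length + 1 - k + k - 1) 0 = x := by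
        have : ps.length + 1 - k + k - 1 = ps.length := by omega
        rw [this, List.getD_append_right _ _ _ _ (le_refl _)]
        simp
      rw [hgl]
  · have h2 : ps.length + 1 - k = 0 := by omega
    simp [wins, h2, hc]
    omega

lemma foldl_astep_phi (L : List Int) (hL : ∀ x ∈ L, 0 ≤ x) :
    ∀ a, L.foldl astep (phi a) = phi (L.foldl obest a) := by
  induction L with
  | nil => intro a; rfl
  | cons x t ih =>
    intro a
    have hx : 0 ≤ x := hL x List.mem_cons_self
    have step : astep (phi a) x = phi (obest a x) := by
      rcases a with _ | ⟨m, M⟩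
      · simp [astep, phi, obest]; omega
      · simp [astep, phi, obest]
    simp only [List.foldl_cons, step]
    exact ih (fun y hy => hL y (List.mem_cons_of_mem _ hy)) (obest a x)

lemma obest_some_pos (L : List Int) (hL : ∀ x ∈ L, 1 ≤ x) :
    ∀ a b, (∀ p, a = some p → 1 ≤ p.2) → L.foldl obest a = some b → 1 ≤ b.2 := by
  induction L with
  | nil =>
    intro a b ha hf
    exact ha b hf
  | cons x t ih =>
    intro a b ha hf
    have hx : 1 ≤ x := hL x List.mem_cons_self
    refine ih (fun y hy => hL y (List.mem_cons_of_mem _ hy)) (obest a x) b ?_ hf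
    intro p hp
    rcases a with _ | ⟨m, M⟩
    · simp only [obest] at hp
      obtain rfl := (Option.some_inj.mp hp).symm
      simpa using hx
    · have h1 := ha (m, M) rfl
      simp only [obest] at hp
      obtain rfl := (Option.some_inj.mp hp).symm
      simp only at h1 ⊢
      omega

lemma allWins_perm (k : Nat) (hk : 1 ≤ k) (l : List (Int × Char)) (i : Int) (c : Char) :
    (allWins k (l ++ [(i, c)])).Perm
      (allWins k l ++
        (if k ≤ (occE l c).length + 1 then
            [i - (occE l c ++ [i]).getD ((occE l c).length + 1 - k) 0 + 1]
          else [])) := by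
  set delta := (if k ≤ (occE l c).length + 1 then
      [i - (occE l c ++ [i]).getD ((occE l c).length + 1 - k) 0 + 1] else []) with hdelta
  have hwin : wins k (occE (l ++ [(i, c)]) c) = wins k (occE l c) ++ delta := by
    rw [occE_append, if_pos rfl, wins_append k hk]
  have hmap : (l ++ [(i, c)]).map (fun p => p.2) = l.map (fun p => p.2) ++ [c] := by simp
  unfold allWins
  rw [hmap, PySem.Set.ofList_append_singleton]
  by_cases hmem : c ∈ PySem.Set.ofList (l.map (fun p => p.2))
  · rw [PySem.Set.add_of_mem hmem]
    have hnd : (PySem.Set.ofList (l.map (fun p => p.2))).Nodup := PySem.Set.nodup_ofList _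
    obtain ⟨D₁, D₂, hsplit⟩ := List.append_of_mem hmem
    rw [hsplit] at hnd ⊢
    rw [List.nodup_append] at hnd
    obtain ⟨h1, h2, h3⟩ := hnd
    have hc1 : c ∉ D₁ := fun hx => h3 c hx c List.mem_cons_self rfl
    have hc2 : c ∉ D₂ := (List.nodup_cons.mp h2).1
    have e1 : D₁.flatMap (fun c' => wins k (occE (l ++ [(i, c)]) c'))
        = D₁.flatMap (fun c' => wins k (occE l c')) := by
      apply List.flatMap_congr
      intro c' hc'
      exact congrArg (wins k) (occE_append_ne l i c c' (fun h => hc1 (h ▸ hc')))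
    have e2 : D₂.flatMap (fun c' => wins k (occE (l ++ [(i, c)]) c'))
        = D₂.flatMap (fun c' => wins k (occE l c')) := by
      apply List.flatMap_congr
      intro c' hc'
      exact congrArg (wins k) (occE_append_ne l i c c' (fun h => hc2 (h ▸ hc')))
    simp only [List.flatMap_append, List.flatMap_cons, e1, e2, hwin]
    have e3 : D₁.flatMap (fun c' => wins k (occE l c')) ++ ((wins k (occE l c) ++ delta) ++ D₂.flatMap (fun c' => wins k (occE l c')))
        = (D₁.flatMap (fun c' => wins k (occE l c')) ++ wins k (occE l c)) ++ (delta ++ D₂.flatMap (fun c' => wins k (occE l c'))) := by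
      simp [List.append_assoc]
    have e4 : (D₁.flatMap (fun c' => wins k (occE l c')) ++ (wins k (occE l c) ++ D₂.flatMap (fun c' => wins k (occE l c')))) ++ delta
        = (D₁.flatMap (fun c' => wins k (occE l c')) ++ wins k (occE l c)) ++ (D₂.flatMap (fun c' => wins k (occE l c')) ++ delta) := by
      simp [List.append_assoc]
    rw [e3, e4]
    exact List.Perm.append_left _ List.perm_append_comm
  · rw [PySem.Set.add_of_not_mem hmem]
    have hclc : occE l c = [] := occE_not_mem l c (fun hx => hmem ((PySem.Set.mem_ofList _ _).mpr hx))
    have e1 : (PySem.Set.ofList (l.map (fun p => p.2))).flatMap (fun c' => wins k (occE (l ++ [(i, c)]) c'))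
        = (PySem.Set.ofList (l.map (fun p => p.2))).flatMap (fun c' => wins k (occE l c')) := by
      apply List.flatMap_congr
      intro c' hc'
      exact congrArg (wins k) (occE_append_ne l i c c' (fun h => hmem (h ▸ hc')))
    have hwc : wins k (occE (l ++ [(i, c)]) c) = delta := by
      rw [hwin, hclc]
      simp [wins]
      omega
    rw [List.flatMap_append, List.flatMap_cons, List.flatMap_nil, e1, hwc, List.append_nil]

lemma A_inner (K : Int) (K' : Nat) (hK : K = (K' : Int)) (h1 : 1 ≤ K')
    (ps : List Int) (acc : Option Int × Int) :
    (if ((ps.length : Int) < K) then acc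
     else
       (PySem.List.pyRange 0 ((ps.length : Int) - K + 1) 1).foldl
         (fun ans i =>
           let len := PySem.List.pyGetD ps (i + K - 1) 0 - PySem.List.pyGetD ps i 0 + 1
           (some (match ans.1 with | none => len | some m => min m len), max ans.2 len))
         acc)
    = (wins K' ps).foldl astep acc := by
  subst hK
  split_ifs with h
  · have hz : ps.length + 1 - K' = 0 := by omega
    simp [wins, hz]
  · have hb : ((ps.length : Int) - (K' : Int) + 1) = ((ps.length + 1 - K' : Nat) : Int) := by omega
    rw [hb, PySem.List.pyRange_zero_nat, List.foldl_map]
    unfold wins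
    rw [List.foldl_map]
    apply PySem.List.foldl_congr_mem
    intro acc i hi
    rw [List.mem_range] at hi
    have e1 : ((i : Int) + (K' : Int) - 1) = ((i + K' - 1 : Nat) : Int) := by omega
    rw [e1, PySem.List.pyGetD_natCast, PySem.List.pyGetD_natCast]
    rfl

lemma A_outer (K : Int) (K' : Nat) (hK : K = (K' : Int)) (h1 : 1 ≤ K')
    (D : List Char) (getv : Char → List Int) (acc : Option Int × Int) :
    D.foldl (fun ans k =>
      if (((getv k).length : Int) < K) then ans
      else
        (PySem.List.pyRange 0 (((getv k).length : Int) - K + 1) 1).foldl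
          (fun ans i =>
            let len := PySem.List.pyGetD (getv k) (i + K - 1) 0 - PySem.List.pyGetD (getv k) i 0 + 1
            (some (match ans.1 with | none => len | some m => min m len), max ans.2 len))
          ans) acc
    = (D.flatMap (fun c => wins K' (getv c))).foldl astep acc := by
  rw [List.foldl_flatMap]
  apply PySem.List.foldl_congr_mem
  intro acc k _
  exact A_inner K K' hK h1 (getv k) acc

lemma B_invariant (K : Int) (K' : Nat) (hK : K = (K' : Int)) (h1 : 1 ≤ K')
    (l : List (Int × Char)) :
    (∀ c, (l.foldl (bstep K)
        ((PySem.Dict.empty : PySem.Dict Char (List Int)), (none : Option (Int × Int)))).1.getD c []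
        = wtail K' (occE l c)) ∧
    (l.foldl (bstep K)
        ((PySem.Dict.empty : PySem.Dict Char (List Int)), (none : Option (Int × Int)))).2
      = (allWins K' l).foldl obest none := by
  haveI := rc_obest
  subst hK
  induction l using List.reverseRecOn with
  | nil =>
    constructor
    · intro c
      simp [PySem.Dict.getD_empty, wtail, occE]
    · simp [allWins, occE]
  | append_singleton l p ih =>
    obtain ⟨ihd, ihb⟩ := ih
    obtain ⟨i, c⟩ := p
    rw [List.foldl_append, List.foldl_cons, List.foldl_nil]
    set s := l.foldl (bstep ((K' : Nat) : Int))
        ((PySem.Dict.empty : PySem.Dict Char (List Int)), (none : Option (Int × Int))) with hs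
    set ps := occE l c with hps
    set m := ps.length with hm
    have hoc : occE (l ++ [(i, c)]) c = ps ++ [i] := by
      rw [occE_append, if_pos rfl, ← hps]
    have hoc' : ∀ c', c' ≠ c → occE (l ++ [(i, c)]) c' = occE l c' := by
      intro c' hc'
      rw [occE_append, if_neg (fun h => hc' h.symm), List.append_nil]
    have hq : s.1.getD c [] ++ [i] = (ps ++ [i]).drop (m + 1 - K') := by
      rw [ihd c, wtail, ← hps, ← hm, List.drop_append_of_le_length (by omega)]
    have hqlen : (s.1.getD c [] ++ [i]).length = (m + 1) - (m + 1 - K') := by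
      rw [hq, List.length_drop]
      simp only [List.length_append, List.length_cons, List.length_nil]
      omega
    have hperm := allWins_perm K' h1 l i c
    rw [← hps, ← hm] at hperm
    by_cases hemit : K' ≤ m + 1
    · have hcond : (((s.1.getD c [] ++ [i]).length : Int) = ((K' : Nat) : Int)) := by
        rw [hqlen]; omega
      have hlen : i - PySem.List.pyGetD (s.1.getD c [] ++ [i]) 0 0 + 1
          = i - (ps ++ [i]).getD (m + 1 - K') 0 + 1 := by
        rw [hq, PySem.List.pyGetD_zero, getD_drop_zero]
      have hgoal1 : bstep ((K' : Nat) : Int) s (i, c)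
          = (s.1.insert c ((ps ++ [i]).drop (m + 2 - K')),
             some (match s.2 with
                   | none => (i - (ps ++ [i]).getD (m + 1 - K') 0 + 1, i - (ps ++ [i]).getD (m + 1 - K') 0 + 1)
                   | some b => (min b.1 (i - (ps ++ [i]).getD (m + 1 - K') 0 + 1), max b.2 (i - (ps ++ [i]).getD (m + 1 - K') 0 + 1)))) := by
        simp only [bstep, hcond, if_pos, hlen]
        rw [hq, List.tail_drop]
        have : m + 1 - K' + 1 = m + 2 - K' := by omega
        rw [this]
      rw [hgoal1]
      constructor
      · intro c'
        by_cases hc' : c' = c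
        · subst hc'
          rw [PySem.Dict.getD_insert, if_pos rfl, hoc, wtail]
          have : (ps ++ [i]).length + 1 - K' = m + 2 - K' := by
            simp only [List.length_append, List.length_cons, List.length_nil]; omega
          rw [this]
        · rw [PySem.Dict.getD_insert, if_neg hc', ihd c', hoc' c' hc']
      · simp only
        rw [ihb, List.Perm.foldl_eq hperm none, if_pos hemit, List.foldl_append,
          List.foldl_cons, List.foldl_nil]
        rcases hfold : List.foldl obest none (allWins K' l) with _ | ⟨bm, bM⟩ <;> rfl
    · have hcond : ¬(((s.1.getD c [] ++ [i]).length : Int) = ((K' : Nat) : Int)) := by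
        rw [hqlen]; omega
      have hgoal1 : bstep ((K' : Nat) : Int) s (i, c) = (s.1.insert c (s.1.getD c [] ++ [i]), s.2) := by
        simp only [bstep, hcond, if_false]
      rw [hgoal1]
      constructor
      · intro c'
        by_cases hc' : c' = c
        · subst hc'
          rw [PySem.Dict.getD_insert, if_pos rfl, hq, hoc, wtail]
          have e1 : m + 1 - K' = 0 := by omega
          have e2 : (ps ++ [i]).length + 1 - K' = 0 := by
            simp only [List.length_append, List.length_cons, List.length_nil]; omega
          rw [e1, e2]
        · rw [PySem.Dict.getD_insert, if_neg hc', ihd c', hoc' c' hc']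
      · simp only
        rw [ihb, List.Perm.foldl_eq hperm none, if_neg (by omega), List.append_nil]

lemma solveA_canon (W : String) (K : Int) (K' : Nat) (hK : K = (K' : Int)) (h1 : 1 ≤ K') :
    solve W K =
      (match (allWins K' (PySem.List.enumerate W.toList 0)).foldl obest none with
       | none => [-1]
       | some b => [b.1, b.2]) := by
  simp only [solve]
  rw [dict_keys]
  rw [A_outer K K' hK h1 _ (fun k =>
    ((PySem.List.enumerate W.toList 0).foldl
      (fun d p => d.modify p.2 [] (fun l => l ++ [p.1])) PySem.Dict.empty).getD k []) (none, -1)]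
  have e : (PySem.Set.ofList ((PySem.List.enumerate W.toList 0).map (fun p => p.2))).flatMap
        (fun c => wins K' (((PySem.List.enumerate W.toList 0).foldl
          (fun d p => d.modify p.2 [] (fun l => l ++ [p.1])) PySem.Dict.empty).getD c []))
      = allWins K' (PySem.List.enumerate W.toList 0) := by
    unfold allWins
    apply List.flatMap_congr
    intro c _
    rw [dict_getD]
  rw [e]
  have hpos := allWins_pos K' h1 W.toList 0
  have h0 : ∀ x ∈ allWins K' (PySem.List.enumerate W.toList 0), 0 ≤ x :=
    fun x hx => le_trans (by omega) (hpos x hx)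
  rw [show ((none : Option Int), (-1 : Int)) = phi none from rfl,
    foldl_astep_phi _ h0 none]
  rcases hfold : (allWins K' (PySem.List.enumerate W.toList 0)).foldl obest none with _ | ⟨bm, bM⟩
  · simp [phi]
  · have hb : 1 ≤ bM := by
      have := obest_some_pos _ hpos none (bm, bM) (by intro p hp; cases hp) hfold
      simpa using this
    simp only [phi]
    rw [if_pos (by simp; omega)]
    simp

lemma solveB_canon (W : String) (K : Int) (K' : Nat) (hK : K = (K' : Int)) (h1 : 1 ≤ K') :
    solve_alt W K =
      (match (allWins K' (PySem.List.enumerate W.toList 0)).foldl obest none with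
       | none => [-1]
       | some b => [b.1, b.2]) := by
  have h := (B_invariant K K' hK h1 (PySem.List.enumerate W.toList 0)).2
  show (match ((PySem.List.enumerate W.toList 0).foldl (bstep K)
        ((PySem.Dict.empty : PySem.Dict Char (List Int)), (none : Option (Int × Int)))).2 with
       | none => [-1]
       | some b => [b.1, b.2]) = _
  rw [h]

-- ===== VERDICT (by name: the statement is the Claim_ definition above) =====
theorem solve_spec : Claim_equal_solve := by
  intro W K _ hPre
  unfold Spec_solve
  rcases hPre with hK | hW
  · have hK' : K = ((K.toNat : Nat) : Int) := by omega
    have h1 : 1 ≤ K.toNat := by omega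
    rw [solveA_canon W K K.toNat hK' h1, solveB_canon W K K.toNat hK' h1]
  · subst hW; rfl
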